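-- pv_equiv track=rewrite | github.com/danimarcast/Python_projects | Ejercicios_python/pares_impares.py | miremos
-- ===== SOURCE A (Python) =====
-- def miremos(A):
--   if A[0] % 2 == 0:
--     par = True   # True para par
--   else:
--     par = False  # False para impar
--
--   listas = []
--   lista  = []
--
--   for i in A:
--     if i % 2 == 0 and par == True:
--       lista.append(i)
--     elif i % 2 == 1 and par == False:
--       lista.append(i)
--     else:
--       listas.append(lista)
--       lista = [i]
--       par = not par
--   return listas
-- ===== SOURCE B (Python) =====
-- def miremos(A):
--     runs = []
--     i = 0
--     n = len(A)
--     while i < n: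
--         j = i + 1
--         while j < n and A[j] % 2 == A[i] % 2:
--             j += 1
--         runs.append(A[i:j])
--         i = j
--     return runs[:-1]
-- ===== Notes on version B (the rewrite author's own statement) =====
-- stated objective: alternative
-- what changed: B replaces A's single pass with a running parity flag and per-element appends by a two-pointer scan that finds the end index of each maximal same-parity run, emits it as one slice A[i:j], and drops the last run with a final slice.
-- crash fix: On the empty list A raises IndexError (it reads A[0]); B returns []. — e.g. on miremos([]): A raises IndexError, B returns []
import Mathlib
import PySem

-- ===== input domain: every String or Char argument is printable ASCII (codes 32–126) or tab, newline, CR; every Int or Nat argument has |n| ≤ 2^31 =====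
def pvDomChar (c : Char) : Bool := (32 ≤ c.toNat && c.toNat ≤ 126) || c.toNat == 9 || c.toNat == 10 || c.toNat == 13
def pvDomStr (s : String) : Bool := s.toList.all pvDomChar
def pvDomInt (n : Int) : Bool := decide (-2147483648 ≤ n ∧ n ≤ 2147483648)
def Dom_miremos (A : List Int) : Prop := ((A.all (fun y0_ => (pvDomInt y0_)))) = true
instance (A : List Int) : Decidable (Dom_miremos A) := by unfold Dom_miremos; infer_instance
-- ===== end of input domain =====

-- B: a two-pointer index scan that emits each maximal same-parity run as one slice A[i:j]
-- and drops the last run, instead of A's one-pass fold with a running parity flag;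
-- equal on all non-empty lists.

-- ===== PORT A =====
def miremosStep (s : List (List Int) × List Int × Bool) (i : Int) :
    List (List Int) × List Int × Bool :=
  let (listas, lista, par) := s
  if PySem.Int.mod i 2 == 0 && par then (listas, lista ++ [i], par)
  else if PySem.Int.mod i 2 == 1 && !par then (listas, lista ++ [i], par)
  else (listas ++ [lista], [i], !par)

def miremos (A : List Int) : List (List Int) :=
  match PySem.List.pyGet? A 0 with
  | none => []   -- Python raises IndexError here (A[0]); excluded by Pre_miremos
  | some a0 =>
    let par := PySem.Int.mod a0 2 == 0
    (A.foldl miremosStep ([], [], par)).1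

-- ===== PORT B =====
-- inner while loop: advance j while A[j] has the same parity as A[i]
-- (A[j]/A[i] are ported as pyGetD: both reads are guarded in bounds, so the default is never used)
def altRunEnd (A : List Int) (i : Int) (j : Int) : Int :=
  if h : j < (A.length : Int) ∧
      PySem.Int.mod (PySem.List.pyGetD A j 0) 2 = PySem.Int.mod (PySem.List.pyGetD A i 0) 2 then
    altRunEnd A i (j + 1)
  else j
termination_by ((A.length : Int) - j).toNat
decreasing_by omega

-- the scan never moves backwards (termination measure of the outer loop)
theorem altRunEnd_ge (A : List Int) (i : Int) :
    ∀ (k : Nat) (j : Int), ((A.length : Int) - j).toNat ≤ k → j ≤ altRunEnd A i j := by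
  intro k
  induction k with
  | zero =>
    intro j hk
    rw [altRunEnd]
    split
    · omega
    · exact le_refl j
  | succ k ih =>
    intro j hk
    rw [altRunEnd]
    split
    · have h1 := ih (j + 1) (by omega)
      omega
    · exact le_refl j

-- outer while loop: peel one run A[i:j] at a time
def altOuter (A : List Int) (i : Int) (runs : List (List Int)) : List (List Int) :=
  if h : i < (A.length : Int) then
    altOuter A (altRunEnd A i (i + 1))
      (runs ++ [PySem.List.slice A (some i) (some (altRunEnd A i (i + 1)))])
  else runs
termination_by ((A.length : Int) - i).toNat
decreasing_by
  have := altRunEnd_ge A i (((A.length : Int) - (i + 1)).toNat) (i + 1) (le_refl _)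
  omega

def miremos_alt (A : List Int) : List (List Int) :=
  PySem.List.slice (altOuter A 0 []) none (some (-1))

-- ===== PRECONDITION & SPEC =====
def Pre_miremos (A : List Int) : Prop := A ≠ []
instance (A : List Int) : Decidable (Pre_miremos A) := by unfold Pre_miremos; infer_instance
def pvWitness_miremos : List Int := ([2, 4, 1])

-- On the empty list A raises IndexError (it reads A[0]); B returns [].
def Raises_miremos (A : List Int) : Prop := A = []
instance (A : List Int) : Decidable (Raises_miremos A) := by unfold Raises_miremos; infer_instance
def pvRaiseWitness_miremos : List Int := ([])
def pvRaiseWitnessOut_miremos : List (List Int) := []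

def Spec_miremos (A : List Int) (out : List (List Int)) : Prop := out = miremos_alt A
instance (A : List Int) (out : List (List Int)) : Decidable (Spec_miremos A out) := by
  unfold Spec_miremos; infer_instance

-- ===== CLAIM (what is proved, stated in full; the proofs are below) =====
def Claim_equal_miremos : Prop :=
  ∀ (A : List Int), Dom_miremos A → Pre_miremos A → Spec_miremos A (miremos A)
def Claim_raises_miremos : Prop :=
  (∀ (A : List Int), Dom_miremos A → Raises_miremos A → ¬ Pre_miremos A) ∧
  (Dom_miremos (pvRaiseWitness_miremos) ∧ Raises_miremos (pvRaiseWitness_miremos) ∧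
    miremos_alt (pvRaiseWitness_miremos) = pvRaiseWitnessOut_miremos)

-- ===== LEMMAS AND PROOFS =====

theorem pymod2 (i : Int) : PySem.Int.mod i 2 = i % 2 :=
  PySem.Int.mod_eq_emod_of_pos (by norm_num)

-- same-parity test (proof helper only)
def pvQ (p : Int) : Int → Bool := fun y => y % 2 == p % 2

-- maximal-run decomposition of a list (common reference point of both ports)
def pvRuns : List Int → List (List Int)
  | [] => []
  | x :: xs => (x :: xs.takeWhile (pvQ x)) :: pvRuns (xs.dropWhile (pvQ x))
termination_by xs => xs.length
decreasing_by exact Nat.lt_succ_of_le (List.length_dropWhile_le ..)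

-- A's loop body, rephrased as a recursion on the remaining input (proof helper only)
def pvE (par : Bool) (lista : List Int) : List Int → List (List Int)
  | [] => []
  | i :: xs =>
    if (PySem.Int.mod i 2 == 0 && par) || (PySem.Int.mod i 2 == 1 && !par)
    then pvE par (lista ++ [i]) xs
    else lista :: pvE (!par) [i] xs

theorem mod2_cases (i : Int) : i % 2 = 0 ∨ i % 2 = 1 := by omega

theorem pvQ_eq (p r : Int) (h : p % 2 = r) : pvQ p = fun y => y % 2 == r := by
  funext y; simp [pvQ, h]

theorem fold_eq_pvE (xs : List Int) :
    ∀ (listas : List (List Int)) (lista : List Int) (par : Bool),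
    (xs.foldl miremosStep (listas, lista, par)).1 = listas ++ pvE par lista xs := by
  induction xs with
  | nil => intro listas lista par; simp [pvE]
  | cons i xs ih =>
    intro listas lista par
    rcases mod2_cases i with h | h <;> cases par <;>
      simp [miremosStep, pvE, h, ih]

theorem pvRuns_cons (x : Int) (xs : List Int) :
    pvRuns (x :: xs) = (x :: xs.takeWhile (pvQ x)) :: pvRuns (xs.dropWhile (pvQ x)) := by
  rw [pvRuns]

theorem pvE_eq_runs (xs : List Int) :
    ∀ (lista : List Int) (par : Bool),
    pvE par lista xs =
      ((lista ++ xs.takeWhile (fun y => y % 2 == (if par then 0 else 1))) ::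
        pvRuns (xs.dropWhile (fun y => y % 2 == (if par then 0 else 1)))).dropLast := by
  induction xs with
  | nil => intro lista par; simp [pvE, pvRuns]
  | cons i xs ih =>
    intro lista par
    rcases mod2_cases i with h | h <;> cases par <;>
      simp [pvE, pvRuns_cons, pvQ_eq i _ h, h, ih, List.dropLast_cons₂]

-- take/drop of the takeWhile prefix length
theorem take_len_takeWhile (q : Int → Bool) (l : List Int) :
    l.take ((l.takeWhile q).length) = l.takeWhile q := by
  induction l with
  | nil => simp
  | cons x xs ih =>
    by_cases h : q x = true <;> simp [List.takeWhile_cons, h, ih]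

theorem drop_len_takeWhile (q : Int → Bool) (l : List Int) :
    l.drop ((l.takeWhile q).length) = l.dropWhile q := by
  induction l with
  | nil => simp
  | cons x xs ih =>
    by_cases h : q x = true <;> simp [List.takeWhile_cons, List.dropWhile_cons, h, ih]

-- the inner while loop computes j + (length of the matching prefix of A.drop j)
theorem runEnd_eq (A : List Int) (i : Int) :
    ∀ (k : Nat) (j : Nat), A.length - j ≤ k →
    altRunEnd A i (j : Int) =
      (j : Int) + (((A.drop j).takeWhile (pvQ (PySem.List.pyGetD A i 0))).length : Int) := by
  intro k
  induction k with
  | zero =>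
    intro j hk
    have hj : A.length ≤ j := by omega
    rw [altRunEnd, List.drop_eq_nil_of_le hj, dif_neg (by rintro ⟨h1, -⟩; omega)]
    simp
  | succ k ih =>
    intro j hk
    by_cases hj : j < A.length
    · have hdrop : A.drop j = A[j] :: A.drop (j + 1) := List.drop_eq_getElem_cons hj
      have hget : PySem.List.pyGetD A (j : Int) 0 = A[j] := by
        simp [List.getElem?_eq_getElem hj]
      rw [altRunEnd]
      by_cases hpar : A[j] % 2 = PySem.List.pyGetD A i 0 % 2
      · rw [dif_pos ⟨by exact_mod_cast hj, by rw [hget, pymod2, pymod2]; exact hpar⟩]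
        have h3 : ((j : Int) + 1) = ((j + 1 : Nat) : Int) := by push_cast; ring
        rw [h3, ih (j + 1) (by omega), hdrop]
        simp only [pvQ, List.takeWhile_cons, hpar, beq_self_eq_true, if_true, List.length_cons]
        push_cast
        ring
      · rw [dif_neg (by rintro ⟨-, hc⟩; rw [hget, pymod2, pymod2] at hc; exact hpar hc), hdrop]
        simp [pvQ, List.takeWhile_cons, hpar]
    · have hj' : A.length ≤ j := by omega
      rw [altRunEnd, List.drop_eq_nil_of_le hj', dif_neg (by rintro ⟨h1, -⟩; omega)]
      simp

-- the outer while loop accumulates exactly the run decomposition of A.drop j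
theorem outer_eq (A : List Int) :
    ∀ (k : Nat) (j : Nat) (runs : List (List Int)), A.length - j ≤ k →
    altOuter A (j : Int) runs = runs ++ pvRuns (A.drop j) := by
  intro k
  induction k with
  | zero =>
    intro j runs hk
    have hj : A.length ≤ j := by omega
    rw [altOuter, dif_neg (by exact_mod_cast not_lt.mpr hj), List.drop_eq_nil_of_le hj, pvRuns]
    simp
  | succ k ih =>
    intro j runs hk
    by_cases hj : j < A.length
    · have hdrop : A.drop j = A[j] :: A.drop (j + 1) := List.drop_eq_getElem_cons hj
      have hget : PySem.List.pyGetD A (j : Int) 0 = A[j] := by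
        simp [List.getElem?_eq_getElem hj]
      have h3 : ((j : Int) + 1) = ((j + 1 : Nat) : Int) := by push_cast; ring
      have hend : altRunEnd A (j : Int) ((j : Int) + 1) =
          (j : Int) + 1 + (((A.drop (j + 1)).takeWhile (pvQ A[j])).length : Int) := by
        have h := runEnd_eq A (j : Int) (A.length - (j + 1)) (j + 1) le_rfl
        rw [hget] at h
        rw [h3, h]
      have hslice : PySem.List.slice A (some (j : Int))
          (some ((j : Int) + 1 + (((A.drop (j + 1)).takeWhile (pvQ A[j])).length : Int))) =
          A[j] :: (A.drop (j + 1)).takeWhile (pvQ A[j]) := by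
        have h1 : (j : Int) + 1 + (((A.drop (j + 1)).takeWhile (pvQ A[j])).length : Int) =
            ((j : Int) + ((((A.drop (j + 1)).takeWhile (pvQ A[j])).length + 1 : Nat) : Int)) := by
          push_cast; ring
        rw [h1, PySem.List.slice_natCast_add, hdrop, List.take_succ_cons, take_len_takeWhile]
      rw [altOuter, dif_pos (by exact_mod_cast hj), hend, hslice]
      have h2 : (j : Int) + 1 + (((A.drop (j + 1)).takeWhile (pvQ A[j])).length : Int) =
          ((j + 1 + ((A.drop (j + 1)).takeWhile (pvQ A[j])).length : Nat) : Int) := by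
        push_cast; ring
      rw [h2, ih (j + 1 + ((A.drop (j + 1)).takeWhile (pvQ A[j])).length) _ (by omega)]
      have hdrop2 : A.drop (j + 1 + ((A.drop (j + 1)).takeWhile (pvQ A[j])).length) =
          (A.drop (j + 1)).dropWhile (pvQ A[j]) := by
        rw [← drop_len_takeWhile (pvQ A[j]) (A.drop (j + 1)), List.drop_drop]
      rw [hdrop2, hdrop, pvRuns_cons]
      simp
    · have hj' : A.length ≤ j := by omega
      rw [altOuter, dif_neg (by exact_mod_cast not_lt.mpr hj'), List.drop_eq_nil_of_le hj', pvRuns]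
      simp

theorem alt_eq_dropLast (A : List Int) : miremos_alt A = (pvRuns A).dropLast := by
  unfold miremos_alt
  have h0 : altOuter A ((0 : Nat) : Int) [] = [] ++ pvRuns (A.drop 0) :=
    outer_eq A A.length 0 [] (by omega)
  simp only [Nat.cast_zero, List.drop_zero, List.nil_append] at h0
  rw [h0, PySem.List.slice_to_neg_one]

-- ===== VERDICT (by name: the statement is the Claim_ definition above) =====
theorem miremos_spec : Claim_equal_miremos := by
  intro A _ hpre
  unfold Spec_miremos
  match A with
  | [] => exact absurd rfl hpre
  | a :: rest =>
    unfold miremos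
    rw [alt_eq_dropLast]
    have hget : PySem.List.pyGet? (a :: rest) 0 = some a := by
      simp [PySem.List.pyGet?, PySem.List.pyIdx?]
    rw [hget]
    simp only [List.foldl_cons]
    rw [pvRuns_cons]
    rcases mod2_cases a with h | h
    · have hstep : miremosStep ([], [], (PySem.Int.mod a 2 == 0)) a = ([], [a], true) := by
        simp [miremosStep, h]
      rw [hstep, fold_eq_pvE, pvE_eq_runs rest [a] true]
      simp [pvQ_eq a _ h, h]
    · have hstep : miremosStep ([], [], (PySem.Int.mod a 2 == 0)) a = ([], [a], false) := by
        simp [miremosStep, h]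
      rw [hstep, fold_eq_pvE, pvE_eq_runs rest [a] false]
      simp [pvQ_eq a _ h, h]

-- miremos_raises delivers the optional crash-fix claim
theorem miremos_raises : Claim_raises_miremos := by
  unfold Claim_raises_miremos
  refine ⟨fun A _ hr hp => hp hr, by decide, rfl, ?_⟩
  rw [show miremos_alt pvRaiseWitness_miremos = (pvRuns pvRaiseWitness_miremos).dropLast from
    alt_eq_dropLast _]
  simp [pvRuns, pvRaiseWitness_miremos, pvRaiseWitnessOut_miremos]

-- self-check extracted from miremos_raises: B's port really returns [] at the raise witness
theorem miremos_raises_ok :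
    miremos_alt pvRaiseWitness_miremos = pvRaiseWitnessOut_miremos :=
  miremos_raises.2.2.2
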